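-- pv_equiv track=rewrite | github.com/moritz/gomon | munge.py | successfull_incomplete_runs
-- ===== SOURCE A (Python) =====
-- def successfull_incomplete_runs(runs):
--     count = 0
--     for run in runs:
--         if run[-1]['results'] == ['Passed']:
--             return count
--
--         for stage in reversed(run):
--             if stage['results'] == ['notyet']:
--                 pass
--             elif stage['results'] == ['Passed']:
--                 count += 1
--                 break
--             else:
--                 break
--     return count
-- ===== SOURCE B (Python) =====
-- def _last_effective(run):
--     """Forward scan: the 'results' of the last stage it is not 'notyet' for, or None."""
--     eff = None
--     for s in run:
--         r = s.get('results')
--         if r != ['notyet']: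
--             eff = r
--     return eff
--
--
-- def successfull_incomplete_runs(runs):
--     # Phase 1: index of the first run whose final stage passed (cutoff).
--     cut = 0
--     while cut < len(runs) and runs[cut][-1]['results'] != ['Passed']:
--         cut += 1
--     # Phase 2: sum of pass-flags over the runs before the cutoff.
--     return sum(_last_effective(run) == ['Passed'] for run in runs[:cut])
-- ===== Notes on version B (the rewrite author's own statement) =====
-- stated objective: alternative
-- what changed: Replaces A's single interleaved loop (early return, reversed break-scan per run, mutable counter) by two staged passes: a while loop locating the cutoff index of the first fully-passed run, then a sum of booleans over the slice before it, where each run is judged by a FORWARD scan that keeps the last non-notyet result instead of A's reversed scan with break.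
import Mathlib
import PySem

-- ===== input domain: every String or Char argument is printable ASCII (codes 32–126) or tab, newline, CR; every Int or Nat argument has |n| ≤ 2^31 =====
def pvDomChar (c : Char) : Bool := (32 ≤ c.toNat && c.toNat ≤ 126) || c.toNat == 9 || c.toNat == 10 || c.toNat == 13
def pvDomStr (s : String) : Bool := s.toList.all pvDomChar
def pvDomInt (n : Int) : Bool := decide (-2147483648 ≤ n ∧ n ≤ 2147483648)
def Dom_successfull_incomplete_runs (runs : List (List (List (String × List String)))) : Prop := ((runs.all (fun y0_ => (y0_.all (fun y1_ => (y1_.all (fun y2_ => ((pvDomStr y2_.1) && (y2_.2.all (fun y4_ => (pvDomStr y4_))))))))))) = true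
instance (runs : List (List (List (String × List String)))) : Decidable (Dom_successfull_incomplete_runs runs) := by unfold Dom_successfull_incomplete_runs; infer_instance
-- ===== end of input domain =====

-- B replaces A's single interleaved loop by two staged passes (while-loop cutoff index, then a sum
-- of booleans over the slice) and judges each run by a FORWARD .get-scan keeping the last
-- non-notyet result instead of A's reversed break-scan.


-- ===== PORT A =====
-- stage['results']: first-match association-list lookup; `.getD []` totalizes the port —
-- a missing key (Python KeyError) is excluded by Pre_ below.
def pvResults (stage : List (String × List String)) : List String :=
  (stage.lookup "results").getD []

-- inner loop: for stage in reversed(run): pass on notyet / count+=1 and break on Passed / break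
def pvInnerA (stages : List (List (String × List String))) (count : Int) : Int :=
  match stages with
  | [] => count
  | s :: rest =>
    if pvResults s = ["notyet"] then pvInnerA rest count
    else if pvResults s = ["Passed"] then count + 1
    else count

-- outer loop with early return; run[-1] via pyGet? (none = IndexError, excluded by Pre_)
def pvLoopA (runs : List (List (List (String × List String)))) (count : Int) : Int :=
  match runs with
  | [] => count
  | run :: rest =>
    if pvResults (((PySem.List.pyGet? run (-1)).getD [])) = ["Passed"] then count
    else pvLoopA rest (pvInnerA run.reverse count)

def successfull_incomplete_runs (runs : List (List (List (String × List String)))) : Int :=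
  pvLoopA runs 0

-- ===== PORT B =====
-- one step of _last_effective's forward loop: r = s.get('results'); if r != ['notyet']: eff = r
-- (Python's None is `none`; s.get never raises, so no totalization is needed here)
def pvStepB (eff : Option (List String)) (s : List (String × List String)) : Option (List String) :=
  let r := s.lookup "results"
  if r ≠ some ["notyet"] then r else eff

-- _last_effective: forward fold keeping the last non-notyet result
def pvLastEff (run : List (List (String × List String))) : Option (List String) :=
  run.foldl pvStepB none

-- phase 1: the while loop computing the cutoff index (guard run[-1]['results'] as in A's Python)
def pvCut (runs : List (List (List (String × List String)))) : Nat :=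
  match runs with
  | [] => 0
  | run :: rest =>
    if (((PySem.List.pyGet? run (-1)).getD []).lookup "results").getD [] = ["Passed"] then 0
    else pvCut rest + 1

-- phase 2: sum of booleans over runs[:cut]
def successfull_incomplete_runs_alt (runs : List (List (List (String × List String)))) : Int :=
  ((runs.take (pvCut runs)).map
    (fun run => if pvLastEff run = some ["Passed"] then (1 : Int) else 0)).sum

-- ===== PRECONDITION & SPEC =====
-- a stage has the 'results' key
def pvHasRes (s : List (String × List String)) : Bool := (s.lookup "results").isSome
-- the run's final stage exists and its 'results' is exactly ['Passed'] (A's early-return guard)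
def pvIsFinalPassed (run : List (List (String × List String))) : Bool :=
  match run.getLast? with
  | some s => s.lookup "results" == some ["Passed"]
  | none => false
-- A's reversed scan only touches stages up to the first non-notyet one; those lookups must succeed
def pvScanSafe (run : List (List (String × List String))) : Bool :=
  match run.reverse.dropWhile (fun s => s.lookup "results" == some ["notyet"]) with
  | [] => true
  | s :: _ => pvHasRes s
-- the run is nonempty and its last stage has 'results' (run[-1]['results'] does not raise)
def pvLastHasRes (run : List (List (String × List String))) : Bool :=
  match run.getLast? with
  | some s => pvHasRes s
  | none => false

-- Pre_ = exactly the inputs on which A returns: every run up to and including the first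
-- fully-passed one must be nonempty with 'results' on its last stage, and every stage A's
-- reversed scan reaches must have 'results' (otherwise A raises IndexError/KeyError).
def Pre_successfull_incomplete_runs (runs : List (List (List (String × List String)))) : Prop :=
  ∀ run ∈ runs.takeWhile (fun r => !(pvIsFinalPassed r)),
    pvLastHasRes run = true ∧ pvScanSafe run = true
instance (runs : List (List (List (String × List String)))) : Decidable (Pre_successfull_incomplete_runs runs) := by unfold Pre_successfull_incomplete_runs; infer_instance

def pvWitness_successfull_incomplete_runs : (List (List (List (String × List String)))) :=
  [[[("results", ["notyet"])], [("results", ["Passed"])]], [[("results", ["Passed"])]]]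

def Spec_successfull_incomplete_runs (runs : List (List (List (String × List String)))) (out : Int) : Prop := out = successfull_incomplete_runs_alt runs
instance (runs : List (List (List (String × List String)))) (out : Int) : Decidable (Spec_successfull_incomplete_runs runs out) := by unfold Spec_successfull_incomplete_runs; infer_instance

-- ===== CLAIM =====
def Claim_equal_successfull_incomplete_runs : Prop := ∀ (runs : List (List (List (String × List String)))), Dom_successfull_incomplete_runs runs → Pre_successfull_incomplete_runs runs → Spec_successfull_incomplete_runs runs (successfull_incomplete_runs runs)

-- ===== LEMMAS AND PROOFS =====
-- the first stage (from the scan's direction) whose lookup is not some ['notyet'], with its lookup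
def pvFind? (stages : List (List (String × List String))) : Option (Option (List String)) :=
  match stages with
  | [] => none
  | s :: rest =>
    let r := s.lookup "results"
    if r ≠ some ["notyet"] then some r else pvFind? rest

theorem pvFind?_append (xs ys : List (List (String × List String))) :
    pvFind? (xs ++ ys) = match pvFind? xs with | some r => some r | none => pvFind? ys := by
  induction xs with
  | nil => simp [pvFind?]
  | cons s t ih =>
    simp only [List.cons_append, pvFind?, ih]
    by_cases h : s.lookup "results" ≠ some ["notyet"] <;> simp [h]

-- A's reversed break-scan counts 1 exactly when the found lookup is some ['Passed']
theorem pvInnerA_eq (stages : List (List (String × List String))) (count : Int) :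
    pvInnerA stages count
      = count + (if pvFind? stages = some (some ["Passed"]) then 1 else 0) := by
  induction stages with
  | nil => simp [pvInnerA, pvFind?]
  | cons s rest ih =>
    have hn' : pvResults s = ["notyet"] ↔ s.lookup "results" = some ["notyet"] := by
      unfold pvResults; cases List.lookup "results" s <;> simp
    have hp' : pvResults s = ["Passed"] ↔ s.lookup "results" = some ["Passed"] := by
      unfold pvResults; cases List.lookup "results" s <;> simp
    simp only [pvInnerA, pvFind?]
    by_cases hn : s.lookup "results" = some ["notyet"]
    · simp [hn, hn'.mpr hn, ih]
    · by_cases hp : s.lookup "results" = some ["Passed"] <;>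
        simp [hn, hp, hn', hp']

-- B's forward fold keeps exactly the found lookup of the reversed list (default = the accumulator)
theorem pvFoldB_eq (l : List (List (String × List String))) (acc : Option (List String)) :
    l.foldl pvStepB acc = (pvFind? l.reverse).getD acc := by
  induction l generalizing acc with
  | nil => simp [pvFind?]
  | cons s t ih =>
    simp only [List.foldl_cons, ih, List.reverse_cons, pvFind?_append]
    rcases hf : pvFind? t.reverse with _ | r
    · simp only [pvFind?, pvStepB]
      by_cases h : s.lookup "results" ≠ some ["notyet"] <;> simp [h]
    · simp

-- per run, A's increment equals B's boolean flag
theorem pvFlag_eq (run : List (List (String × List String))) (count : Int) :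
    pvInnerA run.reverse count
      = count + (if pvLastEff run = some ["Passed"] then 1 else 0) := by
  rw [pvInnerA_eq, pvLastEff, pvFoldB_eq]
  rcases hf : pvFind? run.reverse with _ | r <;> simp

theorem pvLoopA_eq (runs : List (List (List (String × List String)))) (count : Int) :
    pvLoopA runs count = count + successfull_incomplete_runs_alt runs := by
  induction runs generalizing count with
  | nil => simp [pvLoopA, successfull_incomplete_runs_alt, pvCut]
  | cons run rest ih =>
    simp only [pvLoopA, successfull_incomplete_runs_alt, pvCut, pvResults]
    by_cases h : (((PySem.List.pyGet? run (-1)).getD []).lookup "results").getD [] = ["Passed"]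
    · simp [h]
    · simp only [if_neg h, ih, pvFlag_eq, List.take_succ_cons, List.map_cons, List.sum_cons,
        successfull_incomplete_runs_alt]
      ring

-- ===== VERDICT =====
theorem successfull_incomplete_runs_spec : Claim_equal_successfull_incomplete_runs := by
  intro runs _ _
  show successfull_incomplete_runs runs = successfull_incomplete_runs_alt runs
  simp [successfull_incomplete_runs, pvLoopA_eq]
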